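-- pv_equiv track=rewrite | github.com/kts5927/algorithm | 백준/Gold/11037. 중복 없는 수/중복 없는 수.py | find_next_larger_number
-- ===== SOURCE A (Python) =====
-- import itertools
--
-- def find_next_larger_number(N):
--     digits = list(range(1, 10))
--     N_str = str(N)
--     length = len(N_str)
--
--     for perm in itertools.permutations(digits, length):
--         num = int(''.join(map(str, perm)))
--         if num > N:
--             return num
--
--     for perm in itertools.permutations(digits, length + 1):
--         num = int(''.join(map(str, perm)))
--         return num
-- ===== SOURCE B (Python) =====
-- def _distinct_digit_numbers(k):
--     # all k-digit numbers whose digits are distinct and drawn from 1..9,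
--     # built breadth-first, one digit position per round
--     if k > 9:
--         return []
--     states = [(0, ())]
--     for _ in range(k):
--         states = [(v * 10 + d, used + (d,))
--                   for v, used in states
--                   for d in range(1, 10)
--                   if d not in used]
--     return [v for v, _ in states]
--
--
-- def find_next_larger_number(N):
--     L = len(str(N))
--     larger = [x for x in _distinct_digit_numbers(L) if x > N]
--     if larger:
--         return min(larger)
--     bigger = _distinct_digit_numbers(L + 1)
--     return min(bigger) if bigger else None
-- ===== Notes on version B (the rewrite author's own statement) =====
-- stated objective: alternative
-- what changed: A scans itertools.permutations lexicographically and returns the first joined number exceeding N; B builds all distinct-digit numbers breadth-first (one digit position per round, no string join/parse) and takes the minimum of those greater than N, falling back to the minimum of the next length.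
import Mathlib
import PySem

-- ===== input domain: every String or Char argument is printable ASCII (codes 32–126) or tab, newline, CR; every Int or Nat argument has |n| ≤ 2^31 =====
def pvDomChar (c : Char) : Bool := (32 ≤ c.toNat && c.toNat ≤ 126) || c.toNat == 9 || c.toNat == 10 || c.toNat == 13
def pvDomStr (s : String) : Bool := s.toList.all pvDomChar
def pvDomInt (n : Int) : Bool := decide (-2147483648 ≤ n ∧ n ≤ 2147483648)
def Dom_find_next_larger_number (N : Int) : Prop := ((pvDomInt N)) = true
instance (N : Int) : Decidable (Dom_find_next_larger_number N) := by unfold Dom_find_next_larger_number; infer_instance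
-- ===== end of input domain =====

-- B replaces A's lexicographic permutation scan (first hit wins) by a breadth-first
-- product construction of all distinct-digit numbers followed by min over those > N:
-- an alternative decomposition with the same exact return value.

-- ===== PORT A =====

-- list(range(1, 10))
def pvDigits : List Int := PySem.List.pyRange 1 10 1

-- int(''.join(map(str, perm))): every entry of perm is a single digit 1–9, so the
-- joined decimal string parses back as exactly the base-10 left fold of the digits;
-- ported as that fold (exact here).
def pvNum (perm : List Int) : Int := perm.foldl (fun a d => a * 10 + d) 0

-- the first for loop: scan the permutations in order, return the first num > N
def pvFirstLarger (N : Int) : List (List Int) → Option Int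
  | [] => none
  | p :: rest =>
    let num := pvNum p
    if num > N then some num else pvFirstLarger N rest

def find_next_larger_number (N : Int) : Option Int :=
  let digits := pvDigits
  let N_str := PySem.Int.toChars N        -- str(N)
  let length := N_str.length
  match pvFirstLarger N (PySem.List.permutations digits length) with
  | some num => some num
  | none =>
    -- second loop: returns on its first iteration; if it has none, fall through (None)
    match PySem.List.permutations digits (length + 1) with
    | [] => none
    | perm :: _ => some (pvNum perm)

-- ===== PORT B =====

-- states after the k rounds of the comprehension loop: (value, tuple of used digits)
def pvLevels (k : Nat) : List (Int × List Int) :=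
  (List.range k).foldl
    (fun states _ =>
      states.flatMap (fun s =>
        ((PySem.List.pyRange 1 10 1).filter (fun d => decide (d ∉ s.2))).map
          (fun d => (s.1 * 10 + d, s.2 ++ [d]))))
    [(0, [])]

-- _distinct_digit_numbers(k)
def pvDdn (k : Nat) : List Int :=
  if k > 9 then [] else (pvLevels k).map (·.1)

def find_next_larger_number_alt (N : Int) : Option Int :=
  let L := (PySem.Int.toChars N).length   -- len(str(N))
  let larger := (pvDdn L).filter (fun x => decide (x > N))
  if larger ≠ [] then PySem.List.min? larger (fun x => x)
  else
    let bigger := pvDdn (L + 1)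
    if bigger ≠ [] then PySem.List.min? bigger (fun x => x) else none

-- ===== PRECONDITION & SPEC =====
def Spec_find_next_larger_number (N : Int) (out : Option Int) : Prop := out = find_next_larger_number_alt N
instance (N : Int) (out : Option Int) : Decidable (Spec_find_next_larger_number N out) := by unfold Spec_find_next_larger_number; infer_instance

-- ===== CLAIM (what is proved, stated in full; the proofs are below) =====
def Claim_equal_find_next_larger_number : Prop := ∀ (N : Int), Dom_find_next_larger_number N → Spec_find_next_larger_number N (find_next_larger_number N)

-- ===== LEMMAS AND PROOFS =====

-- fold-shift: running the digit fold from an arbitrary accumulator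
theorem pvNum_foldl_shift (p : List Int) (a : Int) :
    p.foldl (fun a d => a * 10 + d) a = a * 10 ^ p.length + pvNum p := by
  induction p generalizing a with
  | nil => simp [pvNum]
  | cons d p ih =>
    simp only [List.foldl_cons, pvNum, List.length_cons]
    rw [ih (a * 10 + d), ih (0 * 10 + d)]
    ring

theorem pvNum_cons (d : Int) (p : List Int) :
    pvNum (d :: p) = d * 10 ^ p.length + pvNum p := by
  have := pvNum_foldl_shift p (0 * 10 + d)
  simpa [pvNum] using this

theorem pvNum_append_singleton (p : List Int) (d : Int) :
    pvNum (p ++ [d]) = pvNum p * 10 + d := by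
  simp [pvNum, List.foldl_append]

theorem pvNum_bounds (p : List Int) (h : ∀ d ∈ p, 0 ≤ d ∧ d ≤ 9) :
    0 ≤ pvNum p ∧ pvNum p < 10 ^ p.length := by
  induction p with
  | nil => simp [pvNum]
  | cons d p ih =>
    have hd := h d (List.mem_cons_self ..)
    have hp := ih (fun x hx => h x (List.mem_cons_of_mem _ hx))
    rw [pvNum_cons]
    have hpow : (0:Int) < 10 ^ p.length := by positivity
    constructor
    · nlinarith [hd.1, hp.1]
    · simp only [List.length_cons, pow_succ]
      nlinarith [hd.2, hp.2]

theorem pv_take_getElem_drop (xs : List Int) (i : Nat) (h : i < xs.length) :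
    xs.take i ++ xs[i] :: xs.drop (i + 1) = xs := by
  rw [List.getElem_cons_drop]; exact List.take_append_drop i xs

theorem pv_getElem_not_mem_eraseIdx (xs : List Int) (i : Nat) (hi : i < xs.length)
    (hnd : xs.Nodup) : xs[i] ∉ xs.eraseIdx i := by
  rw [List.eraseIdx_eq_take_drop_succ]
  rw [← pv_take_getElem_drop xs i hi] at hnd
  rw [List.nodup_append] at hnd
  obtain ⟨-, hnd2, hdisj⟩ := hnd
  rw [List.nodup_cons] at hnd2
  intro hmem
  rcases List.mem_append.1 hmem with h | h
  · exact hdisj _ h _ (List.mem_cons_self ..) rfl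
  · exact hnd2.1 h

theorem pv_mem_eraseIdx_of_ne (xs : List Int) (i : Nat) (hi : i < xs.length)
    (b : Int) (hb : b ∈ xs) (hne : b ≠ xs[i]) : b ∈ xs.eraseIdx i := by
  rw [List.eraseIdx_eq_take_drop_succ]
  rw [← pv_take_getElem_drop xs i hi] at hb
  rcases List.mem_append.1 hb with h | h
  · exact List.mem_append.2 (Or.inl h)
  · rcases List.mem_cons.1 h with h | h
    · exact absurd h hne
    · exact List.mem_append.2 (Or.inr h)

-- membership characterisation of CPython's permutations(xs, r) for duplicate-free xs
theorem mem_permutations_iff (r : Nat) (xs p : List Int) (hnd : xs.Nodup) :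
    p ∈ PySem.List.permutations xs r ↔
      p.length = r ∧ p.Nodup ∧ ∀ a ∈ p, a ∈ xs := by
  induction r generalizing xs p with
  | zero =>
    rw [PySem.List.permutations_zero]
    constructor
    · rintro h
      simp only [List.mem_singleton] at h
      subst h; simp
    · rintro ⟨hlen, -, -⟩
      simp [List.eq_nil_of_length_eq_zero hlen]
  | succ r ih =>
    rw [PySem.List.permutations_succ]
    constructor
    · intro h
      rw [List.mem_flatMap] at h
      obtain ⟨i, hi, hp⟩ := h
      rw [List.mem_range] at hi
      rw [List.getElem?_eq_getElem hi] at hp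
      simp only [List.mem_map] at hp
      obtain ⟨q, hq, rfl⟩ := hp
      obtain ⟨hlen, hqnd, hqsub⟩ := (ih (xs.eraseIdx i) q (hnd.eraseIdx i)).1 hq
      refine ⟨by simp [hlen], ?_, ?_⟩
      · rw [List.nodup_cons]
        exact ⟨fun hmem => pv_getElem_not_mem_eraseIdx xs i hi hnd (hqsub _ hmem), hqnd⟩
      · intro a ha
        rcases List.mem_cons.1 ha with h | h
        · exact h ▸ List.getElem_mem hi
        · exact List.mem_of_mem_eraseIdx (hqsub a h)
    · rintro ⟨hlen, hpnd, hpsub⟩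
      cases p with
      | nil => simp at hlen
      | cons a q =>
        obtain ⟨i, hi, rfl⟩ := List.mem_iff_getElem.1 (hpsub a (List.mem_cons_self ..))
        rw [List.mem_flatMap]
        refine ⟨i, List.mem_range.2 hi, ?_⟩
        rw [List.getElem?_eq_getElem hi]
        simp only [List.mem_map]
        refine ⟨q, ?_, rfl⟩
        rw [List.nodup_cons] at hpnd
        refine (ih (xs.eraseIdx i) q (hnd.eraseIdx i)).2 ⟨by simpa using hlen, hpnd.2, ?_⟩
        intro b hb
        exact pv_mem_eraseIdx_of_ne xs i hi b (hpsub b (List.mem_cons_of_mem _ hb))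
          (fun he => hpnd.1 (he ▸ hb))

-- permutations(xs, r) is empty as soon as r exceeds the pool size
theorem permutations_eq_nil (r : Nat) (xs : List Int) (hnd : xs.Nodup)
    (h : xs.length < r) : PySem.List.permutations xs r = [] := by
  rw [List.eq_nil_iff_forall_not_mem]
  intro p hp
  obtain ⟨hlen, hnp, hsub⟩ := (mem_permutations_iff r xs p hnd).1 hp
  have : p.length ≤ xs.length := by
    calc p.length = p.toFinset.card := (List.toFinset_card_of_nodup hnp).symm
    _ ≤ xs.toFinset.card := Finset.card_le_card (fun x hx => by
          simp only [List.mem_toFinset] at *; exact hsub x hx)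
    _ ≤ xs.length := xs.toFinset_card_le
  omega

-- a flatMap is pairwise when each block is and distinct blocks are cross-related
theorem pairwise_flatMap_of {ι α : Type} {R : α → α → Prop} (g : ι → List α)
    (l : List ι) (hblk : ∀ i ∈ l, (g i).Pairwise R)
    (hcross : l.Pairwise (fun i j => ∀ a ∈ g i, ∀ b ∈ g j, R a b)) :
    (l.flatMap g).Pairwise R := by
  induction l with
  | nil => simp
  | cons i l ih =>
    simp only [List.flatMap_cons, List.pairwise_append]
    refine ⟨hblk i (List.mem_cons_self ..), ih (fun j hj => hblk j (List.mem_cons_of_mem _ hj))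
      (List.Pairwise.of_cons hcross), ?_⟩
    intro a ha b hb
    simp only [List.mem_flatMap] at hb
    obtain ⟨j, hj, hbj⟩ := hb
    exact (List.pairwise_cons.1 hcross).1 j hj a ha b hbj

-- the value list of the permutation scan is strictly increasing
theorem permutations_map_num_pairwise (r : Nat) (xs : List Int)
    (hs : xs.Pairwise (· < ·)) (hb : ∀ d ∈ xs, 0 ≤ d ∧ d ≤ 9) :
    ((PySem.List.permutations xs r).map pvNum).Pairwise (· < ·) := by
  induction r generalizing xs with
  | zero => rw [PySem.List.permutations_zero]; simp
  | succ r ih =>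
    have hnd : xs.Nodup := hs.imp (fun h => ne_of_lt h)
    rw [PySem.List.permutations_succ, List.map_flatMap]
    apply pairwise_flatMap_of
    · -- each block (fixed leading digit) is increasing
      intro i hi
      rw [List.mem_range] at hi
      rw [List.getElem?_eq_getElem hi]
      simp only [List.map_map]
      rw [List.pairwise_map]
      have ihe := ih (xs.eraseIdx i)
        (hs.sublist (List.eraseIdx_sublist ..))
        (fun d hd => hb d (List.mem_of_mem_eraseIdx hd))
      rw [List.pairwise_map] at ihe
      refine ihe.imp_of_mem ?_
      intro q1 q2 h1 h2 hlt
      have hl1 := ((mem_permutations_iff r _ q1 (hnd.eraseIdx i)).1 h1).1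
      have hl2 := ((mem_permutations_iff r _ q2 (hnd.eraseIdx i)).1 h2).1
      simp only [Function.comp]
      rw [pvNum_cons, pvNum_cons, hl1, hl2]
      omega
    · -- blocks with a smaller leading digit come first and stay smaller
      refine List.pairwise_lt_range.imp_of_mem ?_
      intro i j hi hj hij
      rw [List.mem_range] at hi hj
      rw [List.getElem?_eq_getElem hi, List.getElem?_eq_getElem hj]
      intro a ha b hbm
      simp only [List.map_map, List.mem_map, Function.comp] at ha hbm
      obtain ⟨q1, hq1, rfl⟩ := ha
      obtain ⟨q2, hq2, rfl⟩ := hbm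
      obtain ⟨hl1, -, hsub1⟩ := (mem_permutations_iff r _ q1 (hnd.eraseIdx i)).1 hq1
      obtain ⟨hl2, -, hsub2⟩ := (mem_permutations_iff r _ q2 (hnd.eraseIdx j)).1 hq2
      have hb1 := pvNum_bounds q1 (fun d hd => hb d (List.mem_of_mem_eraseIdx (hsub1 d hd)))
      have hb2 := pvNum_bounds q2 (fun d hd => hb d (List.mem_of_mem_eraseIdx (hsub2 d hd)))
      have hxs : xs[i] < xs[j] := List.pairwise_iff_getElem.1 hs i j hi hj hij
      rw [hl1] at hb1; rw [hl2] at hb2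
      rw [pvNum_cons, pvNum_cons, hl1, hl2]
      have hpow : (0:Int) < 10 ^ r := by positivity
      have hxs' : xs[i] + 1 ≤ xs[j] := hxs
      nlinarith [hb1.1, hb1.2, hb2.1, hb2.2,
        mul_le_mul_of_nonneg_right hxs' (le_of_lt hpow)]

-- one round of the comprehension loop
theorem pvLevels_succ (k : Nat) :
    pvLevels (k + 1) =
      (pvLevels k).flatMap (fun s =>
        ((PySem.List.pyRange 1 10 1).filter (fun d => decide (d ∉ s.2))).map
          (fun d => (s.1 * 10 + d, s.2 ++ [d]))) := by
  unfold pvLevels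
  rw [List.range_succ, List.foldl_append]
  rfl

-- state invariant of B's breadth-first construction
theorem mem_pvLevels_iff (k : Nat) (s : Int × List Int) :
    s ∈ pvLevels k ↔
      s.2.length = k ∧ s.2.Nodup ∧ (∀ d ∈ s.2, d ∈ pvDigits) ∧ s.1 = pvNum s.2 := by
  induction k generalizing s with
  | zero =>
    show s ∈ [((0:Int), ([] : List Int))] ↔ _
    constructor
    · intro h
      simp only [List.mem_singleton] at h
      subst h; exact ⟨rfl, List.nodup_nil, by simp, by simp [pvNum]⟩
    · rintro ⟨hlen, -, -, hval⟩
      have h2 : s.2 = [] := List.eq_nil_of_length_eq_zero hlen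
      have : s = (0, []) := by
        cases s; simp_all [pvNum]
      simp [this]
  | succ k ih =>
    rw [pvLevels_succ]
    constructor
    · intro h
      rw [List.mem_flatMap] at h
      obtain ⟨t, ht, hs⟩ := h
      simp only [List.mem_map, List.mem_filter] at hs
      obtain ⟨d, ⟨hd, hdnot⟩, rfl⟩ := hs
      obtain ⟨hlen, hnd, hsub, hval⟩ := (ih t).1 ht
      rw [decide_eq_true_eq] at hdnot
      refine ⟨by simp [hlen], ?_, ?_, ?_⟩
      · simp only [List.nodup_append, List.nodup_cons]
        exact ⟨hnd, by simp, fun a ha b hb => by rw [List.mem_singleton] at hb; subst hb; exact fun he => hdnot (he ▸ ha)⟩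
      · intro b hb
        rcases List.mem_append.1 hb with h | h
        · exact hsub b h
        · rw [List.mem_singleton] at h; exact h ▸ hd
      · simp [pvNum_append_singleton, hval]
    · rintro ⟨hlen, hnd, hsub, hval⟩
      have hne : s.2 ≠ [] := by intro h; rw [h] at hlen; simp at hlen
      set q := s.2.dropLast with hq
      set d := s.2.getLast hne with hd
      have hdecomp : s.2 = q ++ [d] := (List.dropLast_concat_getLast hne).symm
      rw [List.mem_flatMap]
      refine ⟨(pvNum q, q), ?_, ?_⟩
      · apply (ih _).2
        refine ⟨?_, ?_, ?_, rfl⟩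
        · have := hlen; rw [hdecomp] at this; simpa using this
        · have := hnd; rw [hdecomp, List.nodup_append] at this; exact this.1
        · intro b hb
          exact hsub b (by rw [hdecomp]; exact List.mem_append.2 (Or.inl hb))
      · simp only [List.mem_map, List.mem_filter]
        refine ⟨d, ⟨hsub d (by rw [hdecomp]; simp), ?_⟩, ?_⟩
        · rw [decide_eq_true_eq]
          have := hnd; rw [hdecomp, List.nodup_append] at this
          intro hmem
          exact this.2.2 _ hmem _ (List.mem_singleton.2 rfl) rfl
        · have : s.1 = pvNum q * 10 + d := by
            rw [hval, hdecomp, pvNum_append_singleton]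
          cases s with
          | mk v u =>
            simp only at this hdecomp ⊢
            rw [this, ← hdecomp]

-- the head of a strictly increasing list is the min of any list with the same members
theorem head?_eq_min? (l1 l2 : List Int) (hs : l1.Pairwise (· < ·))
    (hmem : ∀ x, x ∈ l1 ↔ x ∈ l2) :
    l1.head? = PySem.List.min? l2 (fun x => x) := by
  cases l1 with
  | nil =>
    have : l2 = [] := by
      rw [List.eq_nil_iff_forall_not_mem]
      intro x hx
      exact (List.not_mem_nil) ((hmem x).2 hx)
    rw [this]
    simp [(PySem.List.min?_eq_none_iff ([] : List Int) (fun x => x)).2 rfl]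
  | cons m t =>
    have hm2 : m ∈ l2 := (hmem m).1 (List.mem_cons_self ..)
    cases hmin : PySem.List.min? l2 (fun x => x) with
    | none =>
      exact absurd ((PySem.List.min?_eq_none_iff l2 _).1 hmin ▸ hm2) List.not_mem_nil
    | some m' =>
      have h1 : m' ≤ m := PySem.List.min?_isMin hmin m hm2
      have hm'1 : m' ∈ m :: t := (hmem m').2 (PySem.List.min?_mem hmin)
      have h2 : m ≤ m' := by
        rcases List.mem_cons.1 hm'1 with h | h
        · exact le_of_eq h.symm
        · exact le_of_lt ((List.pairwise_cons.1 hs).1 m' h)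
      simp [le_antisymm h1 h2]

-- A's first loop is: head of the filtered value list
theorem pvFirstLarger_eq (N : Int) (l : List (List Int)) :
    pvFirstLarger N l = ((l.map pvNum).filter (fun x => decide (x > N))).head? := by
  induction l with
  | nil => rfl
  | cons p rest ih =>
    simp only [pvFirstLarger, List.map_cons, List.filter_cons]
    by_cases h : pvNum p > N
    · simp [h]
    · simp [h, ih]

-- facts about list(range(1, 10))
theorem pvDigits_sorted : pvDigits.Pairwise (· < ·) := by decide
theorem pvDigits_nodup : pvDigits.Nodup := by decide
theorem pvDigits_bounds : ∀ d ∈ pvDigits, 0 ≤ d ∧ d ≤ 9 := by decide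
theorem pvDigits_length : pvDigits.length = 9 := by decide

-- A's value list and B's candidate list have the same members
theorem mem_ddn_iff (k : Nat) (x : Int) :
    x ∈ (PySem.List.permutations pvDigits k).map pvNum ↔ x ∈ pvDdn k := by
  by_cases hk : k > 9
  · rw [permutations_eq_nil k pvDigits pvDigits_nodup (by rw [pvDigits_length]; omega)]
    simp [pvDdn, hk]
  · unfold pvDdn
    rw [if_neg hk]
    constructor
    · intro h
      rw [List.mem_map] at h
      obtain ⟨p, hp, rfl⟩ := h
      obtain ⟨hlen, hnd, hsub⟩ := (mem_permutations_iff k pvDigits p pvDigits_nodup).1 hp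
      rw [List.mem_map]
      exact ⟨(pvNum p, p), (mem_pvLevels_iff k _).2 ⟨hlen, hnd, hsub, rfl⟩, rfl⟩
    · intro h
      rw [List.mem_map] at h
      obtain ⟨s, hsl, rfl⟩ := h
      obtain ⟨hlen, hnd, hsub, hval⟩ := (mem_pvLevels_iff k s).1 hsl
      rw [List.mem_map]
      exact ⟨s.2, (mem_permutations_iff k pvDigits s.2 pvDigits_nodup).2 ⟨hlen, hnd, hsub⟩,
        hval.symm⟩

-- A, rewritten as: head of the filtered value list, else head of the next level's value list
theorem pvA_eq (N : Int) :
    find_next_larger_number N =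
      match (((PySem.List.permutations pvDigits (PySem.Int.toChars N).length).map pvNum).filter
          (fun x => decide (x > N))).head? with
      | some m => some m
      | none =>
        ((PySem.List.permutations pvDigits ((PySem.Int.toChars N).length + 1)).map
          pvNum).head? := by
  simp only [find_next_larger_number]
  rw [pvFirstLarger_eq]
  cases hperm : PySem.List.permutations pvDigits ((PySem.Int.toChars N).length + 1) with
  | nil =>
    cases (((PySem.List.permutations pvDigits (PySem.Int.toChars N).length).map pvNum).filter
        (fun x => decide (x > N))).head? <;> simp
  | cons p rest =>
    cases (((PySem.List.permutations pvDigits (PySem.Int.toChars N).length).map pvNum).filter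
        (fun x => decide (x > N))).head? <;> simp

-- ===== VERDICT (by name: the statement is the Claim_ definition above) =====
theorem find_next_larger_number_spec : Claim_equal_find_next_larger_number := by
  intro N _
  unfold Spec_find_next_larger_number
  rw [pvA_eq]
  simp only [find_next_larger_number_alt]
  set L := (PySem.Int.toChars N).length with hL
  set filterA := (((PySem.List.permutations pvDigits L).map pvNum).filter
    (fun x => decide (x > N))) with hfA
  set larger := ((pvDdn L).filter (fun x => decide (x > N))) with hlg
  have hsorted : filterA.Pairwise (· < ·) :=
    (permutations_map_num_pairwise L pvDigits pvDigits_sorted pvDigits_bounds).filter _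
  have hmemf : ∀ x, x ∈ filterA ↔ x ∈ larger := by
    intro x
    rw [hfA, hlg, List.mem_filter, List.mem_filter, mem_ddn_iff]
  have hkey : filterA.head? = PySem.List.min? larger (fun x => x) :=
    head?_eq_min? _ _ hsorted hmemf
  by_cases hcase : larger = []
  · -- no candidate of the same length beats N: both fall back to the next length
    have hfA0 : filterA = [] := by
      rw [List.eq_nil_iff_forall_not_mem]
      intro x hx
      exact List.not_mem_nil (hcase ▸ (hmemf x).1 hx)
    rw [hfA0]
    rw [if_neg (by simp [hcase])]
    have hsorted2 : ((PySem.List.permutations pvDigits (L + 1)).map pvNum).Pairwise (· < ·) :=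
      permutations_map_num_pairwise (L + 1) pvDigits pvDigits_sorted pvDigits_bounds
    have hkey2 : ((PySem.List.permutations pvDigits (L + 1)).map pvNum).head? =
        PySem.List.min? (pvDdn (L + 1)) (fun x => x) :=
      head?_eq_min? _ _ hsorted2 (fun x => mem_ddn_iff (L + 1) x)
    by_cases hbig : pvDdn (L + 1) = []
    · rw [if_neg (by simp [hbig])]
      rw [hkey2, hbig]
      simp [(PySem.List.min?_eq_none_iff ([] : List Int) (fun x => x)).2 rfl]
    · rw [if_pos hbig]
      exact hkey2
  · -- some same-length candidate beats N: first hit = min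
    cases hmin : PySem.List.min? larger (fun x => x) with
    | none => exact absurd ((PySem.List.min?_eq_none_iff larger _).1 hmin) hcase
    | some m =>
      rw [hkey, hmin, if_pos hcase]
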